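-- pv_equiv track=rewrite | github.com/csh44017/CodingTest | Python3/Lv_1/문자열 나누기/solution1.py | solution
-- ===== SOURCE A (Python) =====
-- def solution(s):
--     cnt_eq, cnt_diff = 0, 0
--     result = 0
--     for i in range(len(s)):
--         if cnt_eq == 0 and cnt_diff == 0:
--             x = s[i]
--
--         if x == s[i]: cnt_eq += 1
--         else: cnt_diff += 1
--
--         if cnt_eq == cnt_diff:
--             result += 1
--             cnt_eq = cnt_diff = 0
--         else:
--             if i == len(s)-1:
--                 result += 1
--     return result
-- ===== SOURCE B (Python) =====
-- def _chop(x, eq, diff, s):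
--     # consume until eq/diff balance; return the suffix after the balance point ("" if none)
--     for i, c in enumerate(s):
--         if c == x:
--             eq += 1
--         else:
--             diff += 1
--         if eq == diff:
--             return s[i + 1:]
--     return ""
--
-- def solution(s):
--     count = 0
--     while s:
--         s = _chop(s[0], 1, 0, s[1:])
--         count += 1
--     return count
-- ===== Notes on version B (the rewrite author's own statement) =====
-- stated objective: alternative
-- what changed: Replaces A's flat accumulating loop (eq/diff counters reset in place, with a special case for the last index) with a group-chopping decomposition: a helper consumes one balanced group and returns the remaining suffix, and solution loops chopping group after group, counting 1 per group.
import Mathlib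
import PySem

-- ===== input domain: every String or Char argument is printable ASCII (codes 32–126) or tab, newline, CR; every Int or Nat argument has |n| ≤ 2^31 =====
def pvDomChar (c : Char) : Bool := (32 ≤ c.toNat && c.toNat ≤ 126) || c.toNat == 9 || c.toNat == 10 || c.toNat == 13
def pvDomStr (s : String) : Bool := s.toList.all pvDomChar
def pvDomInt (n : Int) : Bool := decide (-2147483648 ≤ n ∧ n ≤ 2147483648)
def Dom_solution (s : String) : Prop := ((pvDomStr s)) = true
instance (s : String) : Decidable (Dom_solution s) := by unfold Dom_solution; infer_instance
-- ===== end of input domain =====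

-- B replaces A's flat accumulating loop with divide-and-conquer recursion over suffixes
-- (chop one balanced group, recurse on the rest); same cost class, different decomposition.

-- ===== PORT A =====
-- one iteration of A's for-loop body; state (cnt_eq, cnt_diff, result, x), p = (i, s[i])
def stepA (n : Int) (st : Int × Int × Int × Char) (p : Int × Char) : Int × Int × Int × Char :=
  let ce := st.1; let cd := st.2.1; let res := st.2.2.1; let x := st.2.2.2
  let i := p.1; let c := p.2
  let x := if ce = 0 ∧ cd = 0 then c else x
  let ce' := if x = c then ce + 1 else ce
  let cd' := if x = c then cd else cd + 1
  if ce' = cd' then (0, 0, res + 1, x)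
  else if i = n - 1 then (ce', cd', res + 1, x)
  else (ce', cd', res, x)

def solution (s : String) : Int :=
  let l := s.toList
  ((PySem.List.enumerate l 0).foldl (stepA (l.length : Int)) (0, 0, 0, ' ')).2.2.1

-- ===== PORT B =====
-- _chop: consume until eq/diff balance; return the suffix after the balance point ([] if none)
def chopB (x : Char) (eq diff : Int) : List Char → List Char
  | [] => []
  | c :: cs =>
    let eq' := if c = x then eq + 1 else eq
    let diff' := if c = x then diff else diff + 1
    if eq' = diff' then cs else chopB x eq' diff' cs

theorem chopB_length_le (x : Char) (e d : Int) : ∀ l : List Char, (chopB x e d l).length ≤ l.length := by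
  intro l
  induction l generalizing e d with
  | nil => simp [chopB]
  | cons c cs ih =>
    simp only [chopB]
    split <;> split
    · simp
    · exact Nat.le_trans (ih _ _) (Nat.le_succ _)
    · simp
    · exact Nat.le_trans (ih _ _) (Nat.le_succ _)

-- B's while loop: chop one group per iteration, count it
def solAltLoop : List Char → Int → Int
  | [], count => count
  | x :: rest, count => solAltLoop (chopB x 1 0 rest) (count + 1)
termination_by l _ => l.length
decreasing_by
  exact Nat.lt_succ_of_le (chopB_length_le x 1 0 rest)

def solution_alt (s : String) : Int := solAltLoop s.toList 0

-- ===== PRECONDITION & SPEC =====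
def Spec_solution (s : String) (out : Int) : Prop := out = solution_alt s
instance (s : String) (out : Int) : Decidable (Spec_solution s out) := by unfold Spec_solution; infer_instance

-- ===== CLAIM (what is proved, stated in full; the proofs are below) =====
def Claim_equal_solution : Prop := ∀ (s : String), Dom_solution s → Spec_solution s (solution s)

-- ===== LEMMAS AND PROOFS =====

-- recursive rendering of A's loop: the index test i = n-1 becomes "tail empty"
def recA : List Char → Int × Int × Int × Char → Int
  | [], st => st.2.2.1
  | c :: cs, st =>
    let ce := st.1; let cd := st.2.1; let res := st.2.2.1; let x := st.2.2.2
    let x := if ce = 0 ∧ cd = 0 then c else x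
    let ce' := if x = c then ce + 1 else ce
    let cd' := if x = c then cd else cd + 1
    if ce' = cd' then recA cs (0, 0, res + 1, x)
    else if cs.isEmpty then res + 1
    else recA cs (ce', cd', res, x)

theorem foldA_eq_recA (n : Int) :
    ∀ (l : List Char) (k : Int) (st : Int × Int × Int × Char), k + l.length = n →
      ((PySem.List.enumerate l k).foldl (stepA n) st).2.2.1 = recA l st := by
  intro l
  induction l with
  | nil => intro k st h; simp [PySem.List.enumerate_nil, recA]
  | cons c cs ih =>
    intro k st h
    have hlen : k + (cs.length : Int) + 1 = n := by
      simp only [List.length_cons] at h; push_cast at h ⊢; omega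
    rw [PySem.List.enumerate_cons, List.foldl_cons]
    simp only [stepA, recA]
    by_cases hb : (if (if st.1 = 0 ∧ st.2.1 = 0 then c else st.2.2.2) = c then st.1 + 1 else st.1)
        = (if (if st.1 = 0 ∧ st.2.1 = 0 then c else st.2.2.2) = c then st.2.1 else st.2.1 + 1)
    · simp only [if_pos hb]
      exact ih (k + 1) _ (by omega)
    · simp only [if_neg hb]
      by_cases hcs : cs = []
      · subst hcs
        have hk : k = n - 1 := by simp at hlen; omega
        simp [hk, PySem.List.enumerate_nil]
      · have hk : ¬ (k = n - 1) := by
          have : (cs.length : Int) ≠ 0 := by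
            simpa using fun h0 => hcs (List.length_eq_zero_iff.mp h0)
          omega
        have hcs' : ¬ (cs.isEmpty = true) := by simp [hcs]
        simp only [if_neg hk, if_neg hcs']
        exact ih (k + 1) _ (by omega)

-- proof-side recursive form of B's loop, and its agreement with the accumulator loop
def solAltL : List Char → Int
  | [] => 0
  | x :: rest => 1 + solAltL (chopB x 1 0 rest)
termination_by l => l.length
decreasing_by
  exact Nat.lt_succ_of_le (chopB_length_le x 1 0 rest)

theorem solAltL_nil : solAltL [] = 0 := by simp [solAltL]
theorem solAltL_cons (x : Char) (rest : List Char) :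
    solAltL (x :: rest) = 1 + solAltL (chopB x 1 0 rest) := by
  rw [solAltL]

theorem solAltLoop_eq : ∀ (n : Nat) (l : List Char), l.length ≤ n → ∀ (count : Int),
    solAltLoop l count = count + solAltL l := by
  intro n
  induction n with
  | zero =>
    intro l hl count
    have : l = [] := List.length_eq_zero_iff.mp (Nat.le_zero.mp hl)
    subst this; simp [solAltLoop, solAltL_nil]
  | succ n ih =>
    intro l hl count
    match l with
    | [] => simp [solAltLoop, solAltL_nil]
    | x :: rest =>
      have hlen : (chopB x 1 0 rest).length ≤ n := by
        have := chopB_length_le x 1 0 rest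
        simp only [List.length_cons] at hl; omega
      rw [solAltLoop, solAltL_cons, ih _ hlen]; ring

-- combined invariant: recA from a reset state counts B's groups; recA mid-group
-- counts 1 (for the current group) plus B's groups of the chopped remainder
theorem recA_eq_combined : ∀ n : Nat,
    (∀ (l : List Char), l.length ≤ n → ∀ (r : Int) (x : Char),
        recA l (0, 0, r, x) = r + solAltL l) ∧
    (∀ (cs : List Char), cs.length ≤ n → cs ≠ [] →
        ∀ (ce cd r : Int) (x : Char), ce ≠ cd →
          recA cs (ce, cd, r, x) = r + 1 + solAltL (chopB x ce cd cs)) := by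
  intro n
  induction n with
  | zero =>
    constructor
    · intro l hl r x
      have : l = [] := List.length_eq_zero_iff.mp (Nat.le_zero.mp hl)
      subst this; simp [recA, solAltL_nil]
    · intro cs hcs hne
      exact absurd (List.length_eq_zero_iff.mp (Nat.le_zero.mp hcs)) hne
  | succ n ih =>
    obtain ⟨ihmain, ihmid⟩ := ih
    have mid : ∀ (cs : List Char), cs.length ≤ n + 1 → cs ≠ [] →
        ∀ (ce cd r : Int) (x : Char), ce ≠ cd →
          recA cs (ce, cd, r, x) = r + 1 + solAltL (chopB x ce cd cs) := by
      intro cs hcs hne ce cd r x hnecd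
      match cs with
      | c :: cs' =>
        have hlen : cs'.length ≤ n := by simpa using hcs
        have hnz : ¬ (ce = 0 ∧ cd = 0) := fun h12 => hnecd (h12.1.trans h12.2.symm)
        simp only [recA, chopB]
        rw [if_neg hnz]
        by_cases hc : c = x
        · subst hc
          simp only [if_true]
          by_cases hb : ce + 1 = cd
          · rw [if_pos hb, if_pos hb]
            rw [ihmain cs' hlen (r + 1) c]
          · rw [if_neg hb, if_neg hb]
            by_cases hcs' : cs' = []
            · subst hcs'
              simp [solAltL_nil, chopB]
            · have he : ¬ (cs'.isEmpty = true) := by simp [hcs']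
              rw [if_neg he]
              exact ihmid cs' hlen hcs' _ _ r c hb
        · have hxc : ¬ (x = c) := fun h => hc h.symm
          simp only [if_neg hxc, if_neg hc]
          by_cases hb : ce = cd + 1
          · rw [if_pos hb, if_pos hb]
            rw [ihmain cs' hlen (r + 1) x]
          · rw [if_neg hb, if_neg hb]
            by_cases hcs' : cs' = []
            · subst hcs'
              simp [solAltL_nil, chopB]
            · have he : ¬ (cs'.isEmpty = true) := by simp [hcs']
              rw [if_neg he]
              exact ihmid cs' hlen hcs' _ _ r x hb
    refine ⟨?_, mid⟩
    intro l hl r x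
    match l with
    | [] => simp [recA, solAltL_nil]
    | c :: cs' =>
      have hlen : cs'.length ≤ n := by simpa using hl
      simp only [recA, and_self, if_true, zero_add]
      rw [if_neg (by norm_num : ¬ ((1 : Int) = 0))]
      rw [solAltL_cons]
      by_cases hcs' : cs' = []
      · subst hcs'
        simp [chopB, solAltL_nil]
      · have he : ¬ (cs'.isEmpty = true) := by simp [hcs']
        rw [if_neg he]
        rw [ihmid cs' hlen hcs' 1 0 r c (by norm_num)]; ring

-- ===== VERDICT (by name: the statement is the Claim_ definition above) =====
theorem solution_spec : Claim_equal_solution := by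
  intro s _
  unfold Spec_solution solution solution_alt
  rw [foldA_eq_recA ((s.toList.length : Int)) s.toList 0 (0, 0, 0, ' ') (by simp)]
  rw [(recA_eq_combined s.toList.length).1 s.toList le_rfl 0 ' ']
  rw [solAltLoop_eq s.toList.length s.toList le_rfl 0]
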